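-- pv_equiv track=rewrite | github.com/schneiderb-projects/TwoNotTouchWithSat | TwoNotTouchEquation.py | get_row_column_max_terms
-- ===== SOURCE A (Python) =====
-- def get_row_column_max_terms(truth_table):
--     max_terms = []
--
--     for clause in truth_table:  # iterate over each clause in the truth table
--         positives = 0  # counts the number of true literals
--         adjacent = False  # boolean representing if 2 true literals are adjacent
--         last = False  # boolean representing if the last literal was True
--
--         for literal in clause:  # iterate over each literal in the clause
--             if last and literal > 0:  # if this literal and the last literal are true
--                 adjacent = True  # then the clause contains adjacent literals
--             if literal > 0:  # if the literal is true
--                 positives += 1  # increment true literal count by 1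
--
--             last = literal > 0  # set the last literal depending if current literal is true or false
--
--         if positives != 2 or adjacent:  # if there are more than 2 literals or there are 2 adjacent literals
--             max_terms.append(clause)  # append the clause to the max terms
--
--     return max_terms  # return all the clauses
-- ===== SOURCE B (Python) =====
-- def _positive_positions(clause):
--     return [i for i, l in enumerate(clause) if l > 0]
--
--
-- def get_row_column_max_terms(truth_table):
--     max_terms = []
--     for clause in truth_table:
--         pos = _positive_positions(clause)
--         if len(pos) == 2 and pos[1] - pos[0] > 1:
--             continue  # exactly two non-adjacent true literals: drop
--         max_terms.append(clause)
--     return max_terms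
-- ===== Notes on version B (the rewrite author's own statement) =====
-- stated objective: alternative
-- what changed: B represents each clause by the list of indices of its positive literals and drops exactly the clauses whose position list has length 2 with a gap greater than 1, replacing A's running positives/adjacent/last flags by index arithmetic on positions.
import Mathlib
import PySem

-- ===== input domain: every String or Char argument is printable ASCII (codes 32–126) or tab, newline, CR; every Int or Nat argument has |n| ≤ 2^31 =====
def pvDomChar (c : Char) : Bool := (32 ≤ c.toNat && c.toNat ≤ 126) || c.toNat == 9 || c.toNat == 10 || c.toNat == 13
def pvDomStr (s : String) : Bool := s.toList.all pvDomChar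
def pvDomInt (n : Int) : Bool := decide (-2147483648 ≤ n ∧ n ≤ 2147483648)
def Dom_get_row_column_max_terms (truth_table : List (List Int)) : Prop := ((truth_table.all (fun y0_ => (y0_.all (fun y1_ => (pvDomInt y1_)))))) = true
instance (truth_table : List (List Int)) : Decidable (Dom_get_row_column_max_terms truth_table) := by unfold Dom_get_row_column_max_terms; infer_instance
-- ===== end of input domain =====

-- B represents each clause by the list of indices of its positive literals and drops the
-- clauses whose position list is [i, j] with j - i > 1, instead of A's running
-- positives/adjacent/last flags (alternative decomposition, same cost).


-- ===== PORT A =====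
-- inner loop over a clause: state (positives, adjacent, last)
def pvInnerA (clause : List Int) : Int × Bool × Bool :=
  clause.foldl
    (fun (s : Int × Bool × Bool) literal =>
      let adjacent := s.2.1 || (s.2.2 && decide (literal > 0))
      let positives := if literal > 0 then s.1 + 1 else s.1
      (positives, adjacent, decide (literal > 0)))
    (0, false, false)

def get_row_column_max_terms (truth_table : List (List Int)) : List (List Int) :=
  truth_table.foldl
    (fun max_terms clause =>
      let s := pvInnerA clause
      if s.1 ≠ 2 ∨ s.2.1 = true then max_terms ++ [clause] else max_terms)
    []

-- ===== PORT B =====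
-- [i for i, l in enumerate(clause) if l > 0]
def pvPosIdx (clause : List Int) : List Int :=
  (PySem.List.enumerate clause).filterMap (fun p => if p.2 > 0 then some p.1 else none)

-- "len(pos) == 2 and pos[1] - pos[0] > 1" (the indexing is guarded by the length test,
-- so the two-element pattern match renders it exactly)
def pvDropB (clause : List Int) : Bool :=
  match pvPosIdx clause with
  | [i, j] => decide (j - i > 1)
  | _ => false

def get_row_column_max_terms_alt (truth_table : List (List Int)) : List (List Int) :=
  truth_table.foldl
    (fun max_terms clause =>
      if pvDropB clause then max_terms else max_terms ++ [clause])
    []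

-- ===== PRECONDITION & SPEC =====
def Spec_get_row_column_max_terms (truth_table : List (List Int)) (out : List (List Int)) : Prop := out = get_row_column_max_terms_alt truth_table
instance (truth_table : List (List Int)) (out : List (List Int)) : Decidable (Spec_get_row_column_max_terms truth_table out) := by unfold Spec_get_row_column_max_terms; infer_instance

-- ===== CLAIM (what is proved, stated in full; the proofs are below) =====
def Claim_equal_get_row_column_max_terms : Prop := ∀ (truth_table : List (List Int)), Dom_get_row_column_max_terms truth_table → Spec_get_row_column_max_terms truth_table (get_row_column_max_terms truth_table)

-- ===== LEMMAS AND PROOFS =====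

-- abbreviations used only in the proofs
def pvSumOnes (clause : List Int) : Int := (clause.map (fun l => if l > 0 then (1 : Int) else 0)).sum
def pvZipAny (clause : List Int) : Bool :=
  (clause.zip (clause.drop 1)).any (fun q => decide (q.1 > 0) && decide (q.2 > 0))
def pvHeadPos (clause : List Int) : Bool :=
  match clause with
  | [] => false
  | y :: _ => decide (y > 0)
-- reference form of the positive-position list, indexed from k
def pvGpos (k : Int) : List Int → List Int
  | [] => []
  | x :: xs => if x > 0 then k :: pvGpos (k + 1) xs else pvGpos (k + 1) xs

theorem pvPosIdx_eq_gpos_aux (xs : List Int) : ∀ (k : Int),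
    (PySem.List.enumerate xs k).filterMap (fun p => if p.2 > 0 then some p.1 else none)
      = pvGpos k xs := by
  induction xs with
  | nil => intro k; simp [PySem.List.enumerate_nil, pvGpos]
  | cons x xs ih =>
    intro k
    simp only [PySem.List.enumerate_cons, List.filterMap_cons, pvGpos]
    split_ifs with h <;> simp [ih]

theorem pvPosIdx_eq_gpos (clause : List Int) : pvPosIdx clause = pvGpos 0 clause :=
  pvPosIdx_eq_gpos_aux clause 0

theorem pvGpos_ge (xs : List Int) : ∀ (k v : Int), v ∈ pvGpos k xs → k ≤ v := by
  induction xs with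
  | nil => intro k v h; simp [pvGpos] at h
  | cons x xs ih =>
    intro k v h
    simp only [pvGpos] at h
    split_ifs at h with hx
    · rcases List.mem_cons.1 h with rfl | h
      · omega
      · have := ih (k + 1) v h; omega
    · have := ih (k + 1) v h; omega

theorem pvSumOnes_len (xs : List Int) : ∀ (k : Int),
    pvSumOnes xs = ((pvGpos k xs).length : Int) := by
  induction xs with
  | nil => intro k; simp [pvSumOnes, pvGpos]
  | cons x xs ih =>
    intro k
    have h1 := ih (k + 1)
    simp only [pvSumOnes, List.map_cons, List.sum_cons, pvGpos] at h1 ⊢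
    split_ifs with hx
    · rw [h1]; simp only [List.length_cons]; push_cast; ring
    · rw [h1]; ring

theorem pvZipAny_cons (x : Int) (xs : List Int) :
    pvZipAny (x :: xs) = ((decide (x > 0) && pvHeadPos xs) || pvZipAny xs) := by
  cases xs with
  | nil => simp [pvZipAny, pvHeadPos]
  | cons y ys => simp [pvZipAny, pvHeadPos]

theorem pvGpos_zero (xs : List Int) : ∀ (k : Int), pvGpos k xs = [] →
    pvZipAny xs = false ∧ pvHeadPos xs = false := by
  induction xs with
  | nil => intro k _; simp [pvZipAny, pvHeadPos]
  | cons x xs ih =>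
    intro k h
    simp only [pvGpos] at h
    by_cases hx : x > 0
    · rw [if_pos hx] at h; exact (List.cons_ne_nil _ _ h).elim
    · rw [if_neg hx] at h
      have := ih (k + 1) h
      rw [pvZipAny_cons]
      constructor
      · simp [hx, this.1]
      · simp [pvHeadPos, hx]

theorem pvGpos_one (xs : List Int) : ∀ (k j : Int), pvGpos k xs = [j] →
    pvZipAny xs = false ∧ pvHeadPos xs = decide (j = k) := by
  induction xs with
  | nil => intro k j h; simp [pvGpos] at h
  | cons x xs ih =>
    intro k j h
    simp only [pvGpos] at h
    split_ifs at h with hx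
    · injection h with hk hrest
      have := pvGpos_zero xs (k + 1) hrest
      rw [pvZipAny_cons]
      constructor
      · simp [this.1, this.2]
      · simp [pvHeadPos, hx, hk]
    · have := ih (k + 1) j h
      have hj : k + 1 ≤ j := by
        apply pvGpos_ge xs (k + 1) j; rw [h]; simp
      rw [pvZipAny_cons]
      simp [pvHeadPos, hx, this.1]
      omega

theorem pvGpos_two (xs : List Int) : ∀ (k i j : Int), pvGpos k xs = [i, j] →
    i < j ∧ pvZipAny xs = decide (j = i + 1) := by
  induction xs with
  | nil => intro k i j h; simp [pvGpos] at h
  | cons x xs ih =>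
    intro k i j h
    simp only [pvGpos] at h
    split_ifs at h with hx
    · injection h with hk hrest
      obtain ⟨hz, hh⟩ := pvGpos_one xs (k + 1) j hrest
      have hj : k + 1 ≤ j := by
        apply pvGpos_ge xs (k + 1) j; rw [hrest]; simp
      rw [pvZipAny_cons]
      constructor
      · omega
      · simp [hx, hh, hz, ← hk]
    · obtain ⟨hij, hz⟩ := ih (k + 1) i j h
      rw [pvZipAny_cons]
      simp [pvHeadPos, hx, hz, hij]

-- the inner fold from any state: count adds on, adjacency chains through `last`
theorem pvInnerA_fold (clause : List Int) (p : Int) (adj last : Bool) :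
    clause.foldl
      (fun (s : Int × Bool × Bool) literal =>
        let adjacent := s.2.1 || (s.2.2 && decide (literal > 0))
        let positives := if literal > 0 then s.1 + 1 else s.1
        (positives, adjacent, decide (literal > 0)))
      (p, adj, last)
    = (p + pvSumOnes clause,
       adj || (last && pvHeadPos clause) || pvZipAny clause,
       match clause.getLast? with | some x => decide (x > 0) | none => last) := by
  induction clause generalizing p adj last with
  | nil => simp [pvSumOnes, pvZipAny, pvHeadPos]
  | cons x xs ih =>
    simp only [List.foldl_cons, ih]
    cases xs with
    | nil =>
      simp [pvSumOnes, pvZipAny, pvHeadPos]; split_ifs <;> simp_all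
    | cons y ys =>
      simp only [pvSumOnes, pvZipAny, pvHeadPos, List.map_cons, List.sum_cons,
        List.drop_succ_cons, List.drop_zero, List.zip_cons_cons, List.any_cons,
        List.getLast?_cons_cons, Prod.mk.injEq]
      refine ⟨by split_ifs <;> omega, ?_, rfl⟩
      cases adj <;> cases last <;> by_cases hx : x > 0 <;> by_cases hy : y > 0 <;>
        simp_all [Bool.or_assoc, Bool.or_comm]

theorem pvInnerA_spec (clause : List Int) :
    pvInnerA clause
      = (pvSumOnes clause, pvZipAny clause,
         match clause.getLast? with | some x => decide (x > 0) | none => false) := by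
  unfold pvInnerA
  rw [pvInnerA_fold]
  simp

-- per-clause: A's keep test equals the negation of B's drop test
theorem pvKeep_eq (clause : List Int) :
    ((pvSumOnes clause != 2) || pvZipAny clause) = !pvDropB clause := by
  unfold pvDropB
  rw [pvPosIdx_eq_gpos]
  rcases hg : pvGpos 0 clause with _ | ⟨i, _ | ⟨j, _ | ⟨m, rest⟩⟩⟩
  · rw [pvSumOnes_len clause 0, hg]; simp
  · rw [pvSumOnes_len clause 0, hg]; simp
  · obtain ⟨hij, hz⟩ := pvGpos_two clause 0 i j hg
    have hs : pvSumOnes clause = 2 := by rw [pvSumOnes_len clause 0, hg]; simp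
    simp only [hs, hz]
    simp only [bne_self_eq_false, Bool.false_or]
    by_cases h : j = i + 1 <;> simp [h] <;> omega
  · rw [pvSumOnes_len clause 0, hg]
    simp only [List.length_cons]
    simp
    left
    omega

theorem pvOuterA_fold (truth_table : List (List Int)) (acc : List (List Int)) :
    truth_table.foldl
      (fun max_terms clause =>
        let s := pvInnerA clause
        if s.1 ≠ 2 ∨ s.2.1 = true then max_terms ++ [clause] else max_terms)
      acc
    = acc ++ truth_table.filter (fun clause => (pvSumOnes clause != 2) || pvZipAny clause) := by
  induction truth_table generalizing acc with
  | nil => simp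
  | cons c cs ih =>
    simp only [List.foldl_cons, List.filter_cons]
    rw [pvInnerA_spec]
    by_cases h1 : pvSumOnes c = 2 <;> by_cases h2 : pvZipAny c = true <;>
      simp only [h1, h2, ih, ne_eq, not_true_eq_false, not_false_eq_true, false_or, or_true,
        bne_self_eq_false, Bool.false_or, Bool.or_true, List.append_assoc,
        List.singleton_append, if_pos] <;>
      split_ifs <;> simp_all

theorem pvOuterB_fold (truth_table : List (List Int)) (acc : List (List Int)) :
    truth_table.foldl
      (fun max_terms clause =>
        if pvDropB clause then max_terms else max_terms ++ [clause])
      acc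
    = acc ++ truth_table.filter (fun clause => !pvDropB clause) := by
  induction truth_table generalizing acc with
  | nil => simp
  | cons c cs ih =>
    simp only [List.foldl_cons, List.filter_cons]
    by_cases h : pvDropB c <;> simp [h, ih]

-- ===== VERDICT (by name: the statement is the Claim_ definition above) =====
theorem get_row_column_max_terms_spec : Claim_equal_get_row_column_max_terms := by
  intro truth_table _
  show get_row_column_max_terms truth_table = get_row_column_max_terms_alt truth_table
  unfold get_row_column_max_terms get_row_column_max_terms_alt
  rw [pvOuterA_fold, pvOuterB_fold, List.nil_append, List.nil_append]
  exact List.filter_congr (fun c _ => pvKeep_eq c)
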